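-- pv_equiv track=rewrite | github.com/ARU-life-sciences/mdax | data/synthesise_concatemers.py | multi_switch_concatemer
-- ===== SOURCE A (Python) =====
-- from typing import List, Tuple
--
-- def revcomp(seq: str) -> str:
--     comp = str.maketrans("ACGT", "TGCA")
--     return seq.translate(comp)[::-1]
--
-- def multi_switch_concatemer(
--     seq: str,
--     switches: List[Tuple[int, int, str]],
-- ) -> str:
--     """
--     switches: list of (start, end, orientation)
--     orientation is "+" or "-"
--     """
--     out = []
--     for s, e, orient in switches:
--         frag = seq[s:e]
--         if orient == "-":
--             frag = revcomp(frag)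
--         out.append(frag)
--     return "".join(out)
-- ===== SOURCE B (Python) =====
-- def multi_switch_concatemer(seq, switches):
--     # One precomputed reverse complement; '-' fragments are mirror slices of it.
--     n = len(seq)
--     rc = seq.translate(str.maketrans("ACGT", "TGCA"))[::-1]
--     parts = []
--     for s, e, orient in switches:
--         if s < 0:
--             s += n
--         s = min(max(s, 0), n)
--         if e < 0:
--             e += n
--         e = min(max(e, 0), n)
--         if orient == "-":
--             parts.append(rc[n - e:n - s])
--         else:
--             parts.append(seq[s:e])
--     return "".join(parts)
-- ===== Notes on version B (the rewrite author's own statement) =====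
-- stated objective: alternative
-- what changed: B builds the reverse complement of the whole sequence once and serves '-' fragments as mirror slices rc[n-e:n-s] of it (after normalising slice bounds), instead of translating and reversing each fragment.
import Mathlib
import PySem

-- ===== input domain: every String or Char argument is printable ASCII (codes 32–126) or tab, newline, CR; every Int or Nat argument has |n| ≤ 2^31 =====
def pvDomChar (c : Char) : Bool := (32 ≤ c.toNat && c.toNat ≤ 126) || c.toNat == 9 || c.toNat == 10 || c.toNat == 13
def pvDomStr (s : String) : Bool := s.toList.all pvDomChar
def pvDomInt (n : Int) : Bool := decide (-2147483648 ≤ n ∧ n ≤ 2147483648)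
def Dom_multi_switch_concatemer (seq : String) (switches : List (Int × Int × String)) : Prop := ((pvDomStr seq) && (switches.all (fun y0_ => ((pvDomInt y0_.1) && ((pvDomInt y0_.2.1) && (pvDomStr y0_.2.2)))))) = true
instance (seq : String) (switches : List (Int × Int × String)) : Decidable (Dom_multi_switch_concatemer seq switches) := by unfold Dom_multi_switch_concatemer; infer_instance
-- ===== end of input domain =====

-- B precomputes the reverse complement of the whole sequence once and serves '-' fragments
-- as mirror slices of it (after normalising slice bounds); return values proved equal on all inputs.

-- ===== PORT A =====
-- str.maketrans("ACGT","TGCA") + translate = map this character table (exact: identity off ACGT)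
def pvComp (c : Char) : Char :=
  if c = 'A' then 'T' else if c = 'C' then 'G' else if c = 'G' then 'C' else if c = 'T' then 'A' else c

-- revcomp: translate then [::-1] (s[::-1] is reverse, PySem.List.slice?_none_none_neg_one)
def pvRevcomp (cs : List Char) : List Char := (cs.map pvComp).reverse

def multi_switch_concatemer (seq : String) (switches : List (Int × Int × String)) : String :=
  let out : List (List Char) := switches.foldl
    (fun acc t =>
      let frag := PySem.List.slice seq.toList (some t.1) (some t.2.1)
      let frag := if t.2.2 = "-" then pvRevcomp frag else frag
      acc ++ [frag]) []
  String.ofList out.flatten   -- "".join(out)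

-- ===== PORT B =====
-- Python's min(max(i+n if i<0 else i, 0), n) slice-bound normalisation
def pvNorm (n : Nat) (i : Int) : Nat := (min (max (if i < 0 then i + n else i) 0) n).toNat

def multi_switch_concatemer_alt (seq : String) (switches : List (Int × Int × String)) : String :=
  let cs := seq.toList
  let n := cs.length
  let rc := (cs.map pvComp).reverse
  let parts : List (List Char) := switches.foldl
    (fun acc t =>
      let s := pvNorm n t.1
      let e := pvNorm n t.2.1
      if t.2.2 = "-" then acc ++ [(rc.drop (n - e)).take (e - s)]
      else acc ++ [(cs.drop s).take (e - s)]) []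
  String.ofList parts.flatten

-- ===== PRECONDITION & SPEC =====
def Spec_multi_switch_concatemer (seq : String) (switches : List (Int × Int × String)) (out : String) : Prop := out = multi_switch_concatemer_alt seq switches
instance (seq : String) (switches : List (Int × Int × String)) (out : String) : Decidable (Spec_multi_switch_concatemer seq switches out) := by unfold Spec_multi_switch_concatemer; infer_instance

-- ===== CLAIM (what is proved, stated in full; the proofs are below) =====
def Claim_equal_multi_switch_concatemer : Prop := ∀ (seq : String) (switches : List (Int × Int × String)), Dom_multi_switch_concatemer seq switches → Spec_multi_switch_concatemer seq switches (multi_switch_concatemer seq switches)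

-- ===== LEMMAS AND PROOFS =====
-- B's normalisation is exactly Python's slice clamping
theorem pvNorm_eq_clampIdx (n : Nat) (i : Int) : pvNorm n i = PySem.List.clampIdx n i := by
  unfold pvNorm PySem.List.clampIdx
  split_ifs with h1 h2 <;> omega

theorem pvNorm_le (n : Nat) (i : Int) : pvNorm n i ≤ n := by
  unfold pvNorm; omega

-- the mirror-slice identity: taking a slice from the precomputed reverse complement
theorem mirror_slice (cs : List Char) (ns ne : Nat) (hne : ne ≤ cs.length) :
    (((cs.map pvComp).reverse.drop (cs.length - ne)).take (ne - ns))
      = (((cs.drop ns).take (ne - ns)).map pvComp).reverse := by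
  set l := cs.map pvComp with hl
  have hlen : l.length = cs.length := by simp [hl]
  have h1 : l.reverse.drop (cs.length - ne) = (l.take ne).reverse := by
    rw [List.reverse_take, hlen]
  rw [h1]
  by_cases hns : ns ≤ ne
  · have h2 : (l.take ne).reverse.take (ne - ns) = ((l.take ne).drop ns).reverse := by
      rw [List.reverse_drop]
      congr 1
      simp only [List.length_take, hlen]
      omega
    rw [h2, List.drop_take]
    rw [← List.map_drop, ← List.map_take]
  · have h0 : ne - ns = 0 := by omega
    simp [h0]

-- per-switch fragment equality
theorem frag_eq (cs : List Char) (t : Int × Int × String) :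
    (if t.2.2 = "-" then pvRevcomp (PySem.List.slice cs (some t.1) (some t.2.1))
     else PySem.List.slice cs (some t.1) (some t.2.1))
      = (if t.2.2 = "-" then
           ((cs.map pvComp).reverse.drop (cs.length - pvNorm cs.length t.2.1)).take
             (pvNorm cs.length t.2.1 - pvNorm cs.length t.1)
         else (cs.drop (pvNorm cs.length t.1)).take
             (pvNorm cs.length t.2.1 - pvNorm cs.length t.1)) := by
  have hs : PySem.List.slice cs (some t.1) (some t.2.1)
      = (cs.drop (pvNorm cs.length t.1)).take (pvNorm cs.length t.2.1 - pvNorm cs.length t.1) := by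
    rw [pvNorm_eq_clampIdx, pvNorm_eq_clampIdx]
    rfl
  by_cases h : t.2.2 = "-"
  · simp only [h, if_pos, hs, pvRevcomp]
    rw [mirror_slice cs _ _ (pvNorm_le _ _)]
  · simp only [hs]
    simp [h]

-- the two loops keep equal accumulators
theorem fold_eq (cs : List Char) (sw : List (Int × Int × String)) (acc : List (List Char)) :
    sw.foldl
      (fun acc t =>
        let frag := PySem.List.slice cs (some t.1) (some t.2.1)
        let frag := if t.2.2 = "-" then pvRevcomp frag else frag
        acc ++ [frag]) acc
      = sw.foldl
      (fun acc t =>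
        let s := pvNorm cs.length t.1
        let e := pvNorm cs.length t.2.1
        if t.2.2 = "-" then acc ++ [((cs.map pvComp).reverse.drop (cs.length - e)).take (e - s)]
        else acc ++ [(cs.drop s).take (e - s)]) acc := by
  induction sw generalizing acc with
  | nil => rfl
  | cons t ts ih =>
    simp only [List.foldl_cons]
    rw [ih]
    congr 1
    have hf := frag_eq cs t
    by_cases h : t.2.2 = "-" <;> simp only [h, if_true, if_false] at hf ⊢ <;>
      simp [hf]

-- ===== VERDICT (by name: the statement is the Claim_ definition above) =====
theorem multi_switch_concatemer_spec : Claim_equal_multi_switch_concatemer := by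
  intro seq switches _
  unfold Spec_multi_switch_concatemer multi_switch_concatemer multi_switch_concatemer_alt
  simp only
  congr 2
  exact fold_eq seq.toList switches []
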